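-- pv_equiv track=rewrite | github.com/berangerthomas/ForzaEmbed | src/utils.py | extract_context_around_phrase
-- ===== SOURCE A (Python) =====
-- def extract_context_around_phrase(phrases: list[str], phrase_index: int) -> str:
--     """
--     Extracts and highlights the context around a target sentence.
--
--     Args:
--         phrases (list[str]): List of sentences.
--         phrase_index (int): Index of the target sentence.
--
--     Returns:
--         str: Context with the target sentence highlighted.
--     """
--     context_window = 0
--     start_idx = max(0, phrase_index - context_window)
--     end_idx = min(len(phrases), phrase_index + context_window + 1)
--     context_phrases = phrases[start_idx:end_idx]
--
--     context_with_highlight = []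
--     for i, phrase in enumerate(context_phrases):
--         actual_idx = start_idx + i
--         if actual_idx == phrase_index:
--             context_with_highlight.append(f"**{phrase.strip()}**")
--         else:
--             context_with_highlight.append(phrase.strip())
--     return " ".join(context_with_highlight)
-- ===== SOURCE B (Python) =====
-- def extract_context_around_phrase(phrases: list[str], phrase_index: int) -> str:
--     """Closed form: with context_window=0 the context is the target sentence alone."""
--     if 0 <= phrase_index < len(phrases):
--         return f"**{phrases[phrase_index].strip()}**"
--     return ""
-- ===== Notes on version B (the rewrite author's own statement) =====
-- stated objective: simpler
-- what changed: Since context_window is the constant 0, B replaces the slice + enumerate + accumulator loop + join with a direct bounds check returning the single highlighted stripped phrase (or "" out of range).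
-- intended difference: For -len(phrases) <= phrase_index <= -2 the slice end phrase_index+1 is negative and wraps, so A returns the stripped prefix phrases[0:phrase_index+1] joined with spaces and nothing highlighted (D_ excludes the sub-case where that prefix is a single all-whitespace phrase and both return ""), while B returns ""; B's is intended since a negative index is simply out of range. — e.g. on extract_context_around_phrase(["a ", "b"], -2): A returns "a", B returns ""
import Mathlib
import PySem

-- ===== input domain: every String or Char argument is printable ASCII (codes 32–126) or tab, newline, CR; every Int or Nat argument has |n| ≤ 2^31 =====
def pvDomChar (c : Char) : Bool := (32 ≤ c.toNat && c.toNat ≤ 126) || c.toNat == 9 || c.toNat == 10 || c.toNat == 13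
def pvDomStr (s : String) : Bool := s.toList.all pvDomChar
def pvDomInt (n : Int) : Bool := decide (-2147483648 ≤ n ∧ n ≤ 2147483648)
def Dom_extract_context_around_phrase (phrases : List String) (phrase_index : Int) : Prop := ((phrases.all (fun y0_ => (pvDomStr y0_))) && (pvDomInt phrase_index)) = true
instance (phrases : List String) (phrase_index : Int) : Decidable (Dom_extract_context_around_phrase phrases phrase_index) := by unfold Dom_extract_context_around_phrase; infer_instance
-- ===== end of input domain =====

-- B replaces A's slice + enumerate + loop + join by a direct bounds check (context_window = 0),
-- and fixes A's negative-index slice wraparound (see D_ below).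

-- ===== PORT A =====
def extract_context_around_phrase (phrases : List String) (phrase_index : Int) : String :=
  let context_window : Int := 0
  let start_idx : Int := max 0 (phrase_index - context_window)
  let end_idx : Int := min (phrases.length : Int) (phrase_index + context_window + 1)
  let context_phrases := PySem.List.slice phrases (some start_idx) (some end_idx)
  let context_with_highlight :=
    (PySem.List.enumerate context_phrases).foldl
      (fun acc p =>
        let actual_idx := start_idx + p.1
        if actual_idx = phrase_index then
          acc ++ ["**" ++ PySem.Str.strip p.2 ++ "**"]
        else
          acc ++ [PySem.Str.strip p.2]) []
  PySem.Str.join " " context_with_highlight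

-- ===== PORT B =====
def extract_context_around_phrase_alt (phrases : List String) (phrase_index : Int) : String :=
  if 0 ≤ phrase_index ∧ phrase_index < (phrases.length : Int) then
    "**" ++ PySem.Str.strip (PySem.List.pyGetD phrases phrase_index "") ++ "**"
  else ""

-- ===== PRECONDITION & SPEC =====
-- For -len(phrases) ≤ phrase_index ≤ -2 the slice end phrase_index+1 is negative and wraps, so A
-- returns the stripped prefix phrases[0:phrase_index+1] joined with spaces and nothing highlighted
-- while B returns "" (B's is intended: a negative index is simply out of range); the last conjunct
-- keeps only the inputs where that wrapped prefix is visibly non-empty, i.e. where the outputs differ.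
def D_extract_context_around_phrase (phrases : List String) (phrase_index : Int) : Prop :=
  -(phrases.length : Int) ≤ phrase_index ∧ phrase_index ≤ -2 ∧
    (2 ≤ (phrases.length : Int) + phrase_index + 1 ∨
      ((phrases.getD 0 "").toList.any (fun c => !PySem.Chars.isspace c)) = true)
instance (phrases : List String) (phrase_index : Int) : Decidable (D_extract_context_around_phrase phrases phrase_index) := by unfold D_extract_context_around_phrase; infer_instance

def Spec_extract_context_around_phrase (phrases : List String) (phrase_index : Int) (out : String) : Prop := ¬ D_extract_context_around_phrase phrases phrase_index → out = extract_context_around_phrase_alt phrases phrase_index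
instance (phrases : List String) (phrase_index : Int) (out : String) : Decidable (Spec_extract_context_around_phrase phrases phrase_index out) := by unfold Spec_extract_context_around_phrase; infer_instance

def pvDiffWitness_extract_context_around_phrase : List String × Int := (["a ", "b"], -2)
def pvDiffWitnessOut_extract_context_around_phrase : String × String := ("a", "")

-- ===== CLAIM (what is proved, stated in full; the proofs are below) =====
def Claim_unchanged_extract_context_around_phrase : Prop := ∀ (phrases : List String) (phrase_index : Int), Dom_extract_context_around_phrase phrases phrase_index → Spec_extract_context_around_phrase phrases phrase_index (extract_context_around_phrase phrases phrase_index)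
def Claim_changed_extract_context_around_phrase : Prop := Dom_extract_context_around_phrase (pvDiffWitness_extract_context_around_phrase.1) (pvDiffWitness_extract_context_around_phrase.2) ∧ D_extract_context_around_phrase (pvDiffWitness_extract_context_around_phrase.1) (pvDiffWitness_extract_context_around_phrase.2) ∧ extract_context_around_phrase (pvDiffWitness_extract_context_around_phrase.1) (pvDiffWitness_extract_context_around_phrase.2) = pvDiffWitnessOut_extract_context_around_phrase.1 ∧ extract_context_around_phrase_alt (pvDiffWitness_extract_context_around_phrase.1) (pvDiffWitness_extract_context_around_phrase.2) = pvDiffWitnessOut_extract_context_around_phrase.2 ∧ pvDiffWitnessOut_extract_context_around_phrase.1 ≠ pvDiffWitnessOut_extract_context_around_phrase.2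
def Claim_exact_extract_context_around_phrase : Prop := ∀ (phrases : List String) (phrase_index : Int), Dom_extract_context_around_phrase phrases phrase_index → D_extract_context_around_phrase phrases phrase_index → extract_context_around_phrase phrases phrase_index ≠ extract_context_around_phrase_alt phrases phrase_index

-- ===== LEMMAS AND PROOFS =====

-- with a negative target index the highlight branch of A's loop never fires: the fold is a map of strip
theorem fold_no_highlight (xs : List String) (pi : Int) (hpi : pi < 0) :
    (PySem.List.enumerate xs).foldl
      (fun acc p =>
        if (0:Int) + p.1 = pi then acc ++ ["**" ++ PySem.Str.strip p.2 ++ "**"]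
        else acc ++ [PySem.Str.strip p.2]) [] = xs.map PySem.Str.strip := by
  rw [PySem.List.foldl_congr_mem _ _ (fun acc p => acc ++ [PySem.Str.strip p.2]) _ ?_,
    PySem.List.foldl_append_singleton_eq_map, List.nil_append]
  · conv_rhs => rw [← PySem.List.map_snd_enumerate xs 0, List.map_map]
    rfl
  · intro acc p hp
    obtain ⟨k, hk, rfl⟩ := (PySem.List.mem_enumerate_iff xs 0 p).mp hp
    rw [if_neg (by simp; omega)]

theorem strip_all_space (cs : List Char) (h : ∀ c ∈ cs, PySem.Chars.isspace c) :
    PySem.Chars.strip cs = [] := by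
  have h1 : PySem.Chars.lstrip cs = [] := List.dropWhile_eq_nil_iff.mpr h
  simp [PySem.Chars.strip, h1, PySem.Chars.rstrip]

theorem strip_ne_nil (cs : List Char) (c : Char) (hc : c ∈ cs) (hs : ¬ PySem.Chars.isspace c = true) :
    PySem.Chars.strip cs ≠ [] := by
  have hmem : c ∈ List.dropWhile PySem.Chars.isspace cs := by
    have h := List.takeWhile_append_dropWhile (p := PySem.Chars.isspace) (l := cs)
    rcases List.mem_append.mp (h ▸ hc) with h' | h'
    · exact absurd (List.mem_takeWhile_imp h') hs
    · exact h'
  simp only [PySem.Chars.strip, PySem.Chars.lstrip, PySem.Chars.rstrip, ne_eq,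
    List.reverse_eq_nil_iff, List.dropWhile_eq_nil_iff, not_forall]
  exact ⟨c, by simpa using hmem, hs⟩

-- the wrapped slice phrases[0:pi+1] (with -len ≤ pi ≤ -2) is a prefix
theorem slice_neg (phrases : List String) (pi : Int) (h1 : -(phrases.length:Int) ≤ pi) (h2 : pi ≤ -2) :
    PySem.List.slice phrases (some 0) (some (pi + 1)) = phrases.take (phrases.length - (-(pi+1)).toNat) := by
  have hk : 0 < (-(pi+1)).toNat := by omega
  have hco : -( ((-(pi+1)).toNat : Int)) = pi + 1 := by omega
  rw [PySem.List.slice_zero_start]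
  have h := PySem.List.slice_to_neg_natCast phrases ((-(pi+1)).toNat) hk
  rw [hco] at h
  exact h

-- A's value when -len ≤ pi ≤ -2: the space-join of the stripped wrapped prefix
theorem A_eval_neg (phrases : List String) (pi : Int)
    (h1 : -(phrases.length:Int) ≤ pi) (h2 : pi ≤ -2) :
    extract_context_around_phrase phrases pi =
      PySem.Str.join " "
        ((phrases.take (phrases.length - (-(pi+1)).toNat)).map PySem.Str.strip) := by
  simp only [extract_context_around_phrase]
  rw [show max 0 (pi - 0) = (0:Int) by omega,
    show min ((phrases.length:Int)) (pi + 0 + 1) = pi + 1 by omega,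
    slice_neg phrases pi h1 h2, fold_no_highlight _ pi (by omega)]

-- ===== VERDICT (by name: the statement is the Claim_ definition above) =====
theorem extract_context_around_phrase_spec : Claim_unchanged_extract_context_around_phrase := by
  intro phrases pi _ hD
  show extract_context_around_phrase phrases pi = extract_context_around_phrase_alt phrases pi
  by_cases hin : 0 ≤ pi ∧ pi < (phrases.length:Int)
  · obtain ⟨h0, hlt⟩ := hin
    obtain ⟨j, rfl⟩ : ∃ j:ℕ, pi = (j:Int) := ⟨pi.toNat, (Int.toNat_of_nonneg h0).symm⟩
    have hj : j < phrases.length := by exact_mod_cast hlt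
    have hslice : PySem.List.slice phrases (some (j:Int)) (some ((j:Int)+1)) = [phrases[j]] := by
      have h := PySem.List.slice_natCast_add phrases j 1
      push_cast at h
      rw [h, List.drop_eq_getElem_cons hj, List.take_succ_cons, List.take_zero]
    simp only [extract_context_around_phrase, extract_context_around_phrase_alt, add_zero,
      sub_zero, max_eq_right h0,
      min_eq_right (by omega : (j:Int)+1 ≤ (phrases.length:Int)), hslice,
      PySem.List.enumerate_cons, PySem.List.enumerate_nil, List.foldl_cons, List.foldl_nil,
      List.nil_append, if_pos (And.intro h0 hlt)]
    simp [PySem.Str.join, hj, List.getD_eq_getElem?_getD, String.ext_iff]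
  · have hneg' : ¬ (0 ≤ pi ∧ pi < (phrases.length:Int)) := hin
    by_cases hneg : pi < 0
    · have h1 : max 0 (pi - 0) = 0 := by omega
      have h2 : min ((phrases.length:Int)) (pi + 0 + 1) = pi + 1 := by omega
      rcases lt_trichotomy pi (-1) with h | h | h
      · by_cases hbase : -(phrases.length:Int) ≤ pi
        · -- D's base holds, so ¬ D forces the wrapped prefix to be a single all-whitespace phrase
          have hnD : ¬ (2 ≤ (phrases.length : Int) + pi + 1 ∨
              ((phrases.getD 0 "").toList.any (fun c => !PySem.Chars.isspace c)) = true) := by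
            intro hc
            exact hD ⟨hbase, by omega, hc⟩
          obtain ⟨hm1, hsp⟩ := not_or.mp hnD
          have hall : ∀ c ∈ (phrases.getD 0 "").toList, PySem.Chars.isspace c := by
            intro c hc
            by_contra hcs
            exact absurd (List.any_eq_true.mpr ⟨c, hc, by simpa using hcs⟩) hsp
          have hmt : phrases.length - (-(pi+1)).toNat = 1 := by omega
          have hn2 : 2 ≤ phrases.length := by omega
          rw [A_eval_neg phrases pi hbase (by omega), hmt]
          obtain ⟨p0, rest, rfl⟩ : ∃ p0 rest, phrases = p0 :: rest := by
            cases phrases with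
            | nil => simp at hn2
            | cons a t => exact ⟨a, t, rfl⟩
          have hs0 : PySem.Chars.strip p0.toList = [] :=
            strip_all_space _ (by simpa using hall)
          simp only [extract_context_around_phrase_alt, if_neg hneg',
            List.take_succ_cons, List.take_zero, List.map_cons, List.map_nil]
          simp [PySem.Str.join, PySem.Chars.join_singleton, String.ext_iff, hs0]
        · -- pi below -len: the slice is empty
          have hk : 0 < (-(pi+1)).toNat := by omega
          have hco : -( ((-(pi+1)).toNat : Int)) = pi + 1 := by omega
          have hempty : PySem.List.slice phrases (some (max 0 (pi - 0)))
              (some (min (phrases.length:Int) (pi + 0 + 1))) = [] := by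
            rw [h1, h2, ← hco, PySem.List.slice_zero_start,
              PySem.List.slice_to_neg_natCast phrases _ hk,
              show phrases.length - (-(pi+1)).toNat = 0 by omega, List.take_zero]
          simp only [extract_context_around_phrase, extract_context_around_phrase_alt,
            hempty, PySem.List.enumerate_nil, List.foldl_nil, if_neg hneg']
          simp [PySem.Str.join, PySem.Chars.join_nil]
      · subst h
        have hempty : PySem.List.slice phrases (some (max 0 ((-1:Int) - 0)))
            (some (min (phrases.length:Int) ((-1:Int) + 0 + 1))) = [] := by
          rw [h1, h2, show (-1:Int) + 1 = ((0:Nat):Int) by norm_num,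
            PySem.List.slice_zero_start, PySem.List.slice_to_natCast, List.take_zero]
        simp only [extract_context_around_phrase, extract_context_around_phrase_alt,
          hempty, PySem.List.enumerate_nil, List.foldl_nil, if_neg hneg']
        simp [PySem.Str.join, PySem.Chars.join_nil]
      · omega
    · have h0 : 0 ≤ pi := by omega
      obtain ⟨j, rfl⟩ : ∃ j:ℕ, pi = (j:Int) := ⟨pi.toNat, (Int.toNat_of_nonneg h0).symm⟩
      have hj : phrases.length ≤ j := by
        by_contra hc; exact hin ⟨h0, by exact_mod_cast not_le.mp hc⟩
      have hempty : PySem.List.slice phrases (some (max 0 ((j:Int) - 0)))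
          (some (min (phrases.length:Int) ((j:Int) + 0 + 1))) = [] := by
        rw [max_eq_right (by omega : (0:Int) ≤ (j:Int) - 0),
          show min ((phrases.length:Int)) ((j:Int) + 0 + 1) = ((phrases.length:Nat):Int) by omega,
          show ((j:Int) - 0) = ((j:Nat):Int) by omega,
          PySem.List.slice_natCast, List.drop_eq_nil_of_le hj, List.take_nil]
      simp only [extract_context_around_phrase, extract_context_around_phrase_alt, hempty,
        PySem.List.enumerate_nil, List.foldl_nil, if_neg hneg']
      simp [PySem.Str.join, PySem.Chars.join_nil]

theorem extract_context_around_phrase_changed : Claim_changed_extract_context_around_phrase := by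
  unfold Claim_changed_extract_context_around_phrase; decide

theorem extract_context_around_phrase_tight : Claim_exact_extract_context_around_phrase := by
  intro phrases pi _ hd
  obtain ⟨h1, h2, h3⟩ := hd
  have hneg' : ¬ (0 ≤ pi ∧ pi < (phrases.length:Int)) := by omega
  rw [A_eval_neg phrases pi h1 h2]
  simp only [extract_context_around_phrase_alt, if_neg hneg']
  by_cases hge : 2 ≤ (phrases.length : Int) + pi + 1
  · -- at least two phrases in the wrapped prefix: the join contains the separator
    have hm2 : 2 ≤ phrases.length - (-(pi+1)).toNat := by omega
    have hlen : (phrases.take (phrases.length - (-(pi+1)).toNat)).length =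
        phrases.length - (-(pi+1)).toNat := by
      rw [List.length_take]; omega
    obtain ⟨a, b, t, hT⟩ : ∃ a b t,
        phrases.take (phrases.length - (-(pi+1)).toNat) = a :: b :: t := by
      rcases hE : phrases.take (phrases.length - (-(pi+1)).toNat) with _ | ⟨a, _ | ⟨b, t⟩⟩ <;>
          rw [hE] at hlen <;> simp at hlen <;> try omega
      exact ⟨a, b, t, rfl⟩
    rw [hT]
    simp [PySem.Str.join, PySem.Chars.join_cons_cons, String.ext_iff]
  · -- a single phrase with a non-whitespace character: strip of it is non-empty
    have hany : ((phrases.getD 0 "").toList.any (fun c => !PySem.Chars.isspace c)) = true := by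
      rcases h3 with h | h
      · omega
      · exact h
    have hmt : phrases.length - (-(pi+1)).toNat = 1 := by omega
    have hn2 : 2 ≤ phrases.length := by omega
    rw [hmt]
    obtain ⟨p0, rest, rfl⟩ : ∃ p0 rest, phrases = p0 :: rest := by
      cases phrases with
      | nil => simp at hn2
      | cons a t => exact ⟨a, t, rfl⟩
    obtain ⟨c, hc, hcs⟩ := List.any_eq_true.mp hany
    have hs0 : PySem.Chars.strip p0.toList ≠ [] :=
      strip_ne_nil _ c (by simpa using hc) (by simpa using hcs)
    rw [List.take_succ_cons, List.take_zero]
    simp [PySem.Str.join, PySem.Chars.join_singleton, String.ext_iff, hs0]
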